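-- pv_equiv track=rewrite | github.com/KennethTM/sonarlabel | scripts/plot_sidescan.py | label_colour_map
-- ===== SOURCE A (Python) =====
-- LABEL_COLOURS = [
--     (255, 80,  80,  200),   # red
--     (80,  220, 160, 200),   # green
--     (80,  160, 255, 200),   # blue
--     (255, 200,  60, 200),   # yellow
--     (200,  80, 255, 200),   # purple
--     (80,  230, 230, 200),   # cyan
--     (255, 140,  40, 200),   # orange
-- ]
--
-- def label_colour_map(annotations: list[dict]) -> dict[str, tuple[int, int, int, int]]:
--     seen: dict[str, tuple[int, int, int, int]] = {}
--     idx = 0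
--     for ann in annotations:
--         lbl = str(ann.get("label", "unknown"))
--         if lbl not in seen:
--             seen[lbl] = LABEL_COLOURS[idx % len(LABEL_COLOURS)]
--             idx += 1
--     return seen
-- ===== SOURCE B (Python) =====
-- LABEL_COLOURS = [
--     (255, 80,  80,  200),   # red
--     (80,  220, 160, 200),   # green
--     (80,  160, 255, 200),   # blue
--     (255, 200,  60, 200),   # yellow
--     (200,  80, 255, 200),   # purple
--     (80,  230, 230, 200),   # cyan
--     (255, 140,  40, 200),   # orange
-- ]
--
-- def label_colour_map(annotations):
--     # Stateless prefix-scan formulation: a position i contributes an entry iff it is the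
--     # first occurrence of its label (no earlier occurrence in lbls[:i]), and its colour
--     # index is the number of distinct labels in that prefix (which equals A's counter).
--     lbls = [str(ann.get("label", "unknown")) for ann in annotations]
--     return {lbl: LABEL_COLOURS[len(set(lbls[:i])) % len(LABEL_COLOURS)]
--             for i, lbl in enumerate(lbls)
--             if lbl not in lbls[:i]}
-- ===== Notes on version B (the rewrite author's own statement) =====
-- stated objective: alternative
-- what changed: Replaces A's single pass with a mutable dict and a running counter by a stateless nested-scan formulation: for each position, membership in the raw prefix lbls[:i] decides whether it is a first occurrence, and the colour index is recomputed as the number of distinct labels in that prefix (len(set(lbls[:i]))), so no dict lookup or counter is carried between iterations.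
import Mathlib
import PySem

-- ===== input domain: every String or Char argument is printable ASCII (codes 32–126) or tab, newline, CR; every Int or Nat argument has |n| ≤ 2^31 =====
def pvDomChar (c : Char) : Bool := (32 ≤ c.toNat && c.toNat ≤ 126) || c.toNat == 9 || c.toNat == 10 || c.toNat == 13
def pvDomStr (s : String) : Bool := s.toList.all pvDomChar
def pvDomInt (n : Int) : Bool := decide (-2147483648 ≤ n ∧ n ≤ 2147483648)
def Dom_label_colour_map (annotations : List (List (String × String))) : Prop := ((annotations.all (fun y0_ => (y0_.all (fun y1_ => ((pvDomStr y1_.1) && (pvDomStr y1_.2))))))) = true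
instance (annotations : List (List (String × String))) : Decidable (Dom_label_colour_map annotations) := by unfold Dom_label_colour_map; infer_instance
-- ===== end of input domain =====

-- B replaces A's single pass with a mutable dict and a running counter by a stateless nested-scan
-- formulation over prefixes (objective: alternative; not faster).

-- LABEL_COLOURS (shared module constant)
def pvColours : List (Int × Int × Int × Int) :=
  [(255, 80, 80, 200), (80, 220, 160, 200), (80, 160, 255, 200), (255, 200, 60, 200),
   (200, 80, 255, 200), (80, 230, 230, 200), (255, 140, 40, 200)]

-- str(ann.get("label", "unknown")); str() is the identity on the str values of the dict
def pvLbl (ann : List (String × String)) : String :=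
  (PySem.Dict.ofList ann).getD "label" "unknown"

-- LABEL_COLOURS[i % len(LABEL_COLOURS)] (the index i % 7 is always in range, so getD never defaults)
def pvCol (i : Int) : Int × Int × Int × Int :=
  (PySem.List.pyGet? pvColours (PySem.Int.mod i 7)).getD (0, 0, 0, 0)

-- ===== PORT A =====
def label_colour_map (annotations : List (List (String × String))) : List (String × Int × Int × Int × Int) :=
  let step := fun (st : PySem.Dict String (Int × Int × Int × Int) × Int) (ann : List (String × String)) =>
    let lbl := pvLbl ann
    if st.1.contains lbl then st
    else (st.1.insert lbl (pvCol st.2), st.2 + 1)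
  ((annotations.foldl step (PySem.Dict.empty, 0)).1).items

-- ===== PORT B =====
-- the dict comprehension over enumerate(lbls): keep position i iff lbl ∉ lbls[:i], colour
-- index len(set(lbls[:i])); i comes from enumerate and is cast with toNat for the prefix take
def label_colour_map_alt (annotations : List (List (String × String))) : List (String × Int × Int × Int × Int) :=
  let lbls := annotations.map pvLbl
  (PySem.List.enumerate lbls 0).filterMap (fun p =>
    if p.2 ∈ lbls.take p.1.toNat then none
    else some (p.2, pvCol ((PySem.Set.ofList (lbls.take p.1.toNat)).length)))

-- ===== PRECONDITION & SPEC =====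
def Spec_label_colour_map (annotations : List (List (String × String))) (out : List (String × Int × Int × Int × Int)) : Prop := out = label_colour_map_alt annotations
instance (annotations : List (List (String × String))) (out : List (String × Int × Int × Int × Int)) : Decidable (Spec_label_colour_map annotations out) := by unfold Spec_label_colour_map; infer_instance

-- ===== CLAIM (what is proved, stated in full; the proofs are below) =====
def Claim_equal_label_colour_map : Prop := ∀ (annotations : List (List (String × String))), Dom_label_colour_map annotations → Spec_label_colour_map annotations (label_colour_map annotations)

-- ===== LEMMAS AND PROOFS =====

-- the labels of l that are NEW relative to the (raw, possibly duplicated) prefix pre, in first-occurrence order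
def pvNew (pre l : List String) : List String :=
  match l with
  | [] => []
  | a :: l => if a ∈ pre then pvNew pre l else a :: pvNew (pre ++ [a]) l

theorem pv_ofList_snoc (pre : List String) (a : String) :
    PySem.Set.ofList (pre ++ [a])
      = if a ∈ pre then PySem.Set.ofList pre else PySem.Set.ofList pre ++ [a] := by
  rw [PySem.Set.ofList_append_singleton, PySem.Set.add_eq_ite]
  simp [PySem.Set.mem_ofList]

theorem pvNew_congr (l pre pre' : List String) (h : ∀ x, x ∈ pre ↔ x ∈ pre') :
    pvNew pre l = pvNew pre' l := by
  induction l generalizing pre pre' with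
  | nil => rfl
  | cons a l ih =>
    by_cases ha : a ∈ pre
    · rw [pvNew, if_pos ha, pvNew, if_pos ((h a).mp ha)]
      exact ih pre pre' h
    · have ha' : a ∉ pre' := fun hx => ha ((h a).mpr hx)
      rw [pvNew, if_neg ha, pvNew, if_neg ha']
      congr 1
      exact ih _ _ (fun x => by simp [h x])

theorem pv_update_eq (l pre : List String) :
    PySem.Set.update (PySem.Set.ofList pre) l = PySem.Set.ofList pre ++ pvNew pre l := by
  induction l generalizing pre with
  | nil => simp [PySem.Set.update, pvNew]
  | cons a l ih =>
    have hupd : PySem.Set.update (PySem.Set.ofList pre) (a :: l)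
        = PySem.Set.update (PySem.Set.ofList (pre ++ [a])) l := by
      rw [PySem.Set.update_cons, PySem.Set.ofList_append_singleton]
    by_cases ha : a ∈ pre
    · have hof : PySem.Set.ofList (pre ++ [a]) = PySem.Set.ofList pre := by
        rw [pv_ofList_snoc, if_pos ha]
      rw [hupd, ih, hof]
      have : pvNew (pre ++ [a]) l = pvNew pre l :=
        pvNew_congr l _ _ (by intro x; by_cases hx : x = a <;> simp [hx, ha])
      simp [this, pvNew, ha]
    · have hof : PySem.Set.ofList (pre ++ [a]) = PySem.Set.ofList pre ++ [a] := by
        rw [pv_ofList_snoc, if_neg ha]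
      rw [hupd, ih, hof]
      simp [pvNew, ha]

-- B's filterMap over the suffix, with the growing raw prefix generalized, is the enumerate-map of the new labels
theorem pv_b_inv (suf pre : List String) :
    (PySem.List.enumerate suf (pre.length : Int)).filterMap (fun p =>
        if p.2 ∈ (pre ++ suf).take p.1.toNat then none
        else some (p.2, pvCol ((PySem.Set.ofList ((pre ++ suf).take p.1.toNat)).length)))
      = (PySem.List.enumerate (pvNew pre suf) ((PySem.Set.ofList pre).length : Int)).map
          (fun p => (p.2, pvCol p.1)) := by
  induction suf generalizing pre with
  | nil => simp [pvNew]
  | cons a suf ih =>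
    rw [PySem.List.enumerate_cons]
    have htake : ((pre.length : Int)).toNat = pre.length := Int.toNat_natCast _
    have hpre : (pre ++ a :: suf).take pre.length = pre := by
      exact List.take_left ..
    have hassoc : pre ++ a :: suf = (pre ++ [a]) ++ suf := by simp
    have hlen : ((pre ++ [a]).length : Int) = (pre.length : Int) + 1 := by simp
    by_cases ha : a ∈ pre
    · have hof : PySem.Set.ofList (pre ++ [a]) = PySem.Set.ofList pre := by
        rw [pv_ofList_snoc, if_pos ha]
      have hnew : pvNew pre (a :: suf) = pvNew (pre ++ [a]) suf := by
        rw [pvNew, if_pos ha]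
        exact (pvNew_congr suf _ _ (by intro x; by_cases hx : x = a <;> simp [hx, ha])).symm
      rw [List.filterMap_cons]
      simp only [htake, hpre, if_pos ha]
      rw [hnew, ← hof]
      have := ih (pre ++ [a])
      rw [hlen] at this
      rw [← this, hassoc]
    · have hof : PySem.Set.ofList (pre ++ [a]) = PySem.Set.ofList pre ++ [a] := by
        rw [pv_ofList_snoc, if_neg ha]
      rw [List.filterMap_cons]
      simp only [htake, hpre, if_neg ha]
      rw [pvNew, if_neg ha, PySem.List.enumerate_cons, List.map_cons]
      refine congrArg (List.cons _) ?_
      have := ih (pre ++ [a])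
      rw [hlen, hof] at this
      rw [show ((PySem.Set.ofList pre ++ [a]).length : Int)
            = ((PySem.Set.ofList pre).length : Int) + 1 by simp] at this
      rw [hassoc]
      exact this

-- invariant of A's loop: the dict's items are the enumerate-map of its (nodup) keys and the counter is the key count
theorem pv_inv (l : List (List (String × String)))
    (d : PySem.Dict String (Int × Int × Int × Int)) (n : Int)
    (hnd : d.keys.Nodup) (hn : n = (d.keys.length : Int))
    (hit : d.items = (PySem.List.enumerate d.keys 0).map (fun p => (p.2, pvCol p.1))) :
    (l.foldl (fun (st : PySem.Dict String (Int × Int × Int × Int) × Int)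
                  (ann : List (String × String)) =>
        let lbl := pvLbl ann
        if st.1.contains lbl then st
        else (st.1.insert lbl (pvCol st.2), st.2 + 1)) (d, n)).1.items
      = (PySem.List.enumerate (PySem.Set.update d.keys (l.map pvLbl)) 0).map
          (fun p => (p.2, pvCol p.1)) := by
  induction l generalizing d n with
  | nil => simpa [PySem.Set.update] using hit
  | cons a l ih =>
    simp only [List.foldl_cons, List.map_cons]
    by_cases hc : d.contains (pvLbl a) = true
    · have hmem : pvLbl a ∈ d.keys := (PySem.Dict.contains_iff_mem_keys _ _).mp hc
      have hadd : PySem.Set.add d.keys (pvLbl a) = d.keys := by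
        simp [PySem.Set.add, PySem.Set.contains, hmem]
      rw [show (PySem.Set.update d.keys (pvLbl a :: l.map pvLbl))
            = PySem.Set.update (PySem.Set.add d.keys (pvLbl a)) (l.map pvLbl) from rfl, hadd]
      simpa [hc] using ih d n hnd hn hit
    · have hc' : d.contains (pvLbl a) = false := by simpa using hc
      have hmem : pvLbl a ∉ d.keys := fun h =>
        by simp [(PySem.Dict.contains_iff_mem_keys _ _).mpr h] at hc'
      have hkeys : (d.insert (pvLbl a) (pvCol n)).keys = d.keys ++ [pvLbl a] :=
        PySem.Dict.keys_insert_of_not_contains _ _ hc'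
      have hnd' : (d.insert (pvLbl a) (pvCol n)).keys.Nodup := by
        exact PySem.Dict.nodup_keys_insert _ _ _ hnd
      have hadd : PySem.Set.add d.keys (pvLbl a) = d.keys ++ [pvLbl a] := by
        simp [PySem.Set.add, PySem.Set.contains, hmem]
      have hit' : (d.insert (pvLbl a) (pvCol n)).items
          = (PySem.List.enumerate (d.insert (pvLbl a) (pvCol n)).keys 0).map
              (fun p => (p.2, pvCol p.1)) := by
        rw [PySem.Dict.items_insert_of_not_contains _ _ hc', hkeys,
          PySem.List.enumerate_append]
        simp [hit, PySem.List.enumerate, hn]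
      have := ih (d.insert (pvLbl a) (pvCol n)) (n + 1) hnd'
        (by rw [hkeys]; simp [hn]) hit'
      rw [show (PySem.Set.update d.keys (pvLbl a :: l.map pvLbl))
            = PySem.Set.update (PySem.Set.add d.keys (pvLbl a)) (l.map pvLbl) from rfl, hadd]
      simpa [hc', ← hkeys] using this

-- ===== VERDICT (by name: the statement is the Claim_ definition above) =====
theorem label_colour_map_spec : Claim_equal_label_colour_map := by
  intro annotations _
  unfold Spec_label_colour_map label_colour_map label_colour_map_alt
  rw [pv_inv annotations PySem.Dict.empty 0 (by simp) (by simp) (by simp [PySem.Dict.empty])]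
  have hb := pv_b_inv (annotations.map pvLbl) []
  simp only [List.nil_append, List.length_nil, Int.natCast_zero] at hb
  rw [hb]
  have hnew : pvNew [] (annotations.map pvLbl)
      = PySem.Set.update (PySem.Set.ofList []) (annotations.map pvLbl) := by
    rw [pv_update_eq]; simp [PySem.Set.ofList]
  rw [hnew]
  simp [PySem.Dict.empty, PySem.Set.ofList]
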